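-- pv_equiv track=rewrite | github.com/StreamPy/StreamPy | StreamPy/StreamPy-UI/src/root/nested/helper.py | clean_id
-- ===== SOURCE A (Python) =====
-- def clean_id(component):
--     '''
--     clean_id() splits and returns the component name with id
--     in two strings
--
--     Parameters
--     ----------
--     component : str
--         Component names with random id
--
--     Returns
--     -------
--     label : str
--         Plain component name with no id
--
--     cid : str
--         The id that was appended to the component
--
--     '''
--     if '_' not in component:
--         return component, ''
--
--     l_array = component.split('_')
--     l = len(l_array) - 1
--     cid = l_array[l]
--     label = str()
--     for i in range(0, l):
--         label = label + l_array[i] + '_'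
--     label = label[:-1]
--
--     return label, cid
-- ===== SOURCE B (Python) =====
-- def clean_id(component):
--     if '_' not in component:
--         return component, ''
--     idx = component.rfind('_')
--     return component[:idx], component[idx + 1:]
-- ===== Notes on version B (the rewrite author's own statement) =====
-- stated objective: simpler
-- what changed: Instead of splitting on the underscore separator into a list and reconcatenating all but the last segment in a loop, B finds the position of the last underscore with rfind and slices the string twice around it.
import Mathlib
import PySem

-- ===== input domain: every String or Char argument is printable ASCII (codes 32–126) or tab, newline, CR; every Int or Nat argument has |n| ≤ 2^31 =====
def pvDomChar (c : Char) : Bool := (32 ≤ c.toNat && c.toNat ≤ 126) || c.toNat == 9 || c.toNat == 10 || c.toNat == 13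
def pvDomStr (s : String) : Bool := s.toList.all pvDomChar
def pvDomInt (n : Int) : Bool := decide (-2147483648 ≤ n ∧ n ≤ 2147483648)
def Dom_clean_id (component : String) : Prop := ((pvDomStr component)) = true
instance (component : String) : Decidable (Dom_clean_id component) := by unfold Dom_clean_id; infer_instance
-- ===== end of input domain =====

-- B replaces A's split-into-list-and-reconcatenate loop by one rfind of the last '_' and two slices (simpler; same cost).

-- ===== PORT A =====
def clean_id (component : String) : String × String :=
  let cs := component.toList
  if PySem.Chars.isIn ['_'] cs = false then (component, "")
  else
    let l_array := PySem.Chars.splitOn cs ['_']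
    let l : Nat := l_array.length - 1
    let cid := PySem.List.pyGetD l_array (l : Int) []
    let label :=
      (PySem.List.pyRange 0 (l : Int) 1).foldl
        (fun acc i => acc ++ PySem.List.pyGetD l_array i [] ++ ['_']) []
    let label := PySem.List.slice label none (some (-1))
    (String.ofList label, String.ofList cid)

-- ===== PORT B =====
def clean_id_alt (component : String) : String × String :=
  let cs := component.toList
  if PySem.Chars.isIn ['_'] cs = false then (component, "")
  else
    let idx := PySem.Chars.rfind cs ['_']
    (String.ofList (PySem.List.slice cs none (some idx)),
     String.ofList (PySem.List.slice cs (some (idx + 1)) none))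

-- ===== PRECONDITION & SPEC =====
def Spec_clean_id (component : String) (out : String × String) : Prop := out = clean_id_alt component
instance (component : String) (out : String × String) : Decidable (Spec_clean_id component out) := by unfold Spec_clean_id; infer_instance

-- ===== CLAIM (what is proved, stated in full; the proofs are below) =====
def Claim_equal_clean_id : Prop := ∀ (component : String), Dom_clean_id component → Spec_clean_id component (clean_id component)

-- ===== LEMMAS AND PROOFS =====

-- reference version of Python's split('_') (single-char separator), structural recursion
def mySplitRef : List Char → List Char → List (List Char)
  | [], cur => [cur.reverse]
  | c :: rest, cur => if c = '_' then cur.reverse :: mySplitRef rest [] else mySplitRef rest (c :: cur)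

theorem isPrefixOf_underscore (c : Char) (r : List Char) :
    (['_'].isPrefixOf (c :: r)) = ('_' == c) := by simp [List.isPrefixOf]

theorem not_isPrefixOf_underscore (ys : List Char) (h : '_' ∉ ys) :
    ¬ (['_'].isPrefixOf ys = true) := by
  cases ys with
  | nil => simp [List.isPrefixOf]
  | cons c r =>
    simp only [isPrefixOf_underscore, beq_iff_eq]
    intro hc; exact h (List.mem_cons.mpr (Or.inl hc))

theorem splitOn_go_eq_ref (fuel : Nat) :
    ∀ (l cur : List Char) (acc : List (List Char)), l.length < fuel →
      PySem.Chars.splitOn.go ['_'] fuel l cur acc = acc.reverse ++ mySplitRef l cur := by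
  induction fuel with
  | zero => intro l cur acc h; omega
  | succ fuel ih =>
    intro l cur acc h
    cases l with
    | nil =>
      rw [PySem.Chars.splitOn.go.eq_def]; simp [mySplitRef]
    | cons c rest =>
      simp only [List.length_cons] at h
      rw [PySem.Chars.splitOn.go.eq_def]
      simp only [isPrefixOf_underscore]
      by_cases hc : c = '_'
      · have hbeq : ('_' == c) = true := by simp [hc]
        simp only [hbeq, if_pos]
        rw [ih _ _ _ (by simp only [List.length_drop, List.length_cons, List.length_nil]; omega)]
        rw [show mySplitRef (c :: rest) cur = cur.reverse :: mySplitRef (List.drop ['_'].length (c :: rest)) [] from by rw [mySplitRef, if_pos hc]; rfl]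
        simp
      · have hbeq : ('_' == c) = false := by simp; exact fun e => hc e.symm
        simp only [hbeq, Bool.false_eq_true, if_false]
        rw [ih _ _ _ (by omega)]
        rw [show mySplitRef (c :: rest) cur = mySplitRef rest (c :: cur) from by rw [mySplitRef, if_neg hc]]

theorem splitOn_eq_ref (cs : List Char) :
    PySem.Chars.splitOn cs ['_'] = mySplitRef cs [] := by
  show PySem.Chars.splitOn.go ['_'] (cs.length + 1) cs [] [] = _
  rw [splitOn_go_eq_ref _ _ _ _ (by omega)]; rfl

theorem mySplitRef_no_sep (ys : List Char) (h : '_' ∉ ys) :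
    ∀ cur, mySplitRef ys cur = [cur.reverse ++ ys] := by
  induction ys with
  | nil => intro cur; simp [mySplitRef]
  | cons c r ih =>
    intro cur
    have hc : c ≠ '_' := fun e => h (by simp [e])
    simp only [mySplitRef, if_neg hc]
    rw [ih (fun m => h (by simp [m])) (c :: cur)]
    simp

theorem mySplitRef_last (xs ys : List Char) (h : '_' ∉ ys) :
    ∀ cur, mySplitRef (xs ++ '_' :: ys) cur = mySplitRef xs cur ++ [ys] := by
  induction xs with
  | nil =>
    intro cur
    rw [List.nil_append,
        show mySplitRef ('_' :: ys) cur = cur.reverse :: mySplitRef ys [] from by rw [mySplitRef, if_pos rfl],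
        mySplitRef_no_sep ys h []]
    simp [mySplitRef]
  | cons c r ih =>
    intro cur
    by_cases hc : c = '_'
    · rw [List.cons_append,
          show mySplitRef (c :: (r ++ '_' :: ys)) cur = cur.reverse :: mySplitRef (r ++ '_' :: ys) [] from by rw [mySplitRef, if_pos hc],
          ih [],
          show mySplitRef (c :: r) cur = cur.reverse :: mySplitRef r [] from by rw [mySplitRef, if_pos hc]]
      simp
    · rw [List.cons_append,
          show mySplitRef (c :: (r ++ '_' :: ys)) cur = mySplitRef (r ++ '_' :: ys) (c :: cur) from by rw [mySplitRef, if_neg hc],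
          show mySplitRef (c :: r) cur = mySplitRef r (c :: cur) from by rw [mySplitRef, if_neg hc]]
      exact ih (c :: cur)

theorem mySplitRef_foldl (xs : List Char) :
    ∀ (cur a0 : List Char),
      (mySplitRef xs cur).foldl (fun a p => a ++ p ++ ['_']) a0
        = a0 ++ cur.reverse ++ xs ++ ['_'] := by
  induction xs with
  | nil => intro cur a0; simp [mySplitRef]
  | cons c r ih =>
    intro cur a0
    by_cases hc : c = '_'
    · rw [show mySplitRef (c :: r) cur = cur.reverse :: mySplitRef r [] from by rw [mySplitRef, if_pos hc],
          List.foldl_cons, ih [] (a0 ++ cur.reverse ++ ['_'])]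
      simp [hc]
    · rw [show mySplitRef (c :: r) cur = mySplitRef r (c :: cur) from by rw [mySplitRef, if_neg hc],
          ih (c :: cur) a0]
      simp

theorem last_underscore_decomp (cs : List Char) (h : '_' ∈ cs) :
    ∃ pre suf, cs = pre ++ '_' :: suf ∧ '_' ∉ suf := by
  induction cs with
  | nil => simp at h
  | cons c r ih =>
    by_cases hr : '_' ∈ r
    · obtain ⟨pre, suf, he, hn⟩ := ih hr
      exact ⟨c :: pre, suf, by simp [he], hn⟩
    · have hc : c = '_' := by
        rcases List.mem_cons.mp h with h1 | h2
        · exact h1.symm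
        · exact absurd h2 hr
      exact ⟨[], r, by simp [hc], hr⟩

theorem rfind_go_succ (s sub : List Char) (j : Nat) :
    PySem.Chars.rfind.go s sub (j + 1)
      = if sub.isPrefixOf (List.drop (j + 1) s) = true then ((j + 1 : Nat) : Int)
        else PySem.Chars.rfind.go s sub j := by
  rw [PySem.Chars.rfind.go.eq_def]

theorem rfind_go_last (pre suf : List Char) (h : '_' ∉ suf) :
    ∀ j, pre.length ≤ j →
      PySem.Chars.rfind.go (pre ++ '_' :: suf) ['_'] j = (pre.length : Int) := by
  intro j
  induction j with
  | zero =>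
    intro hj
    have hp : pre = [] := List.eq_nil_of_length_eq_zero (by omega)
    subst hp
    rw [PySem.Chars.rfind.go.eq_def]
    simp
  | succ j ih =>
    intro hj
    rw [rfind_go_succ]
    by_cases he : pre.length = j + 1
    · have : List.drop (j + 1) (pre ++ '_' :: suf) = '_' :: suf := by
        rw [← he, List.drop_left]
      rw [this]
      simp [he]
    · have hle : pre.length ≤ j := by omega
      have hd : List.drop (j + 1) (pre ++ '_' :: suf)
          = List.drop (j + 1 - pre.length) ('_' :: suf) := by
        rw [List.drop_append, List.drop_eq_nil_of_le (by omega), List.nil_append]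
      have hd2 : List.drop (j + 1 - pre.length) ('_' :: suf)
          = List.drop (j - pre.length) suf := by
        have : j + 1 - pre.length = (j - pre.length) + 1 := by omega
        rw [this, List.drop_succ_cons]
      have hnp : ¬ (['_'].isPrefixOf (List.drop (j + 1) (pre ++ '_' :: suf)) = true) := by
        rw [hd, hd2]
        exact not_isPrefixOf_underscore _ (fun hm => h (List.mem_of_mem_drop hm))
      simp only [hnp, if_false, Bool.false_eq_true]
      exact ih hle

theorem rfind_last (pre suf : List Char) (h : '_' ∉ suf) :
    PySem.Chars.rfind (pre ++ '_' :: suf) ['_'] = (pre.length : Int) := by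
  show PySem.Chars.rfind.go _ _ (pre ++ '_' :: suf).length = _
  exact rfind_go_last pre suf h _ (by simp)

theorem foldl_range_getD (suf : List Char) (Q : List (List Char)) :
    ∀ (a0 : List Char),
      (List.range Q.length).foldl (fun acc n => acc ++ (Q ++ [suf]).getD n [] ++ ['_']) a0
        = Q.foldl (fun a p => a ++ p ++ ['_']) a0 := by
  induction Q with
  | nil => intro a0; simp
  | cons q Q ih =>
    intro a0
    rw [List.length_cons, List.range_succ_eq_map, List.foldl_cons, List.foldl_map]
    simp only [List.cons_append, List.getD_cons_zero, List.getD_cons_succ]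
    exact ih (a0 ++ q ++ ['_'])

theorem foldl_pyRange_eq (Q : List (List Char)) (suf : List Char) :
    (PySem.List.pyRange 0 (Q.length : Int) 1).foldl
        (fun acc i => acc ++ PySem.List.pyGetD (Q ++ [suf]) i [] ++ ['_']) []
      = Q.foldl (fun a p => a ++ p ++ ['_']) [] := by
  rw [show PySem.List.pyRange 0 (Q.length : Int) 1 = PySem.List.pyRange 0 (Q.length : Int) from rfl,
      PySem.List.pyRange_zero_natCast, List.foldl_map]
  simp only [PySem.List.pyGetD_natCast]
  exact foldl_range_getD suf Q []

theorem mem_of_isIn (cs : List Char) (h : PySem.Chars.isIn ['_'] cs = true) : '_' ∈ cs := by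
  have := (PySem.Chars.isIn_iff_infix ['_'] cs).mp h
  obtain ⟨s, t, he⟩ := this
  rw [← he]; simp

-- ===== VERDICT (by name: the statement is the Claim_ definition above) =====
theorem clean_id_spec : Claim_equal_clean_id := by
  intro component _
  unfold Spec_clean_id clean_id clean_id_alt
  set cs := component.toList with hcs
  by_cases hin : PySem.Chars.isIn ['_'] cs = false
  · simp [hin]
  · have hin' : PySem.Chars.isIn ['_'] cs = true := by
      cases hb : PySem.Chars.isIn ['_'] cs
      · exact absurd hb hin
      · rfl
    simp only [hin', Bool.true_eq_false, if_false]
    obtain ⟨pre, suf, he, hns⟩ := last_underscore_decomp cs (mem_of_isIn cs hin')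
    rw [he]
    -- A side
    rw [splitOn_eq_ref, mySplitRef_last pre suf hns []]
    set Q := mySplitRef pre [] with hQ
    have hlen : (Q ++ [suf]).length - 1 = Q.length := by simp
    rw [hlen]
    have hcid : PySem.List.pyGetD (Q ++ [suf]) (Q.length : Int) [] = suf := by
      rw [PySem.List.pyGetD_natCast]
      simp [List.getD]
    have hlabel : (PySem.List.pyRange 0 (Q.length : Int) 1).foldl
        (fun acc i => acc ++ PySem.List.pyGetD (Q ++ [suf]) i [] ++ ['_']) [] = pre ++ ['_'] := by
      rw [foldl_pyRange_eq, hQ, mySplitRef_foldl]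
      simp
    rw [hcid, hlabel, PySem.List.slice_to_neg_one, List.dropLast_concat]
    -- B side
    rw [rfind_last pre suf hns]
    rw [PySem.List.slice_to _ (by positivity), PySem.List.slice_from _ (by positivity)]
    rw [Int.toNat_natCast, List.take_left' rfl]
    have : ((pre.length : Int) + 1).toNat = (pre ++ ['_']).length := by simp
    rw [this, show pre ++ '_' :: suf = (pre ++ ['_']) ++ suf by simp, List.drop_left]
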